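-- pv_equiv track=rewrite | github.com/Karthik777/fastops | fastops/teardown.py | _infer_resource_type
-- ===== SOURCE A (Python) =====
-- def _infer_resource_type(env_dict):
--     'Infer resource type from environment variables'
--     if 'DATABASE_URL' in env_dict:
--         return 'database'
--     elif 'REDIS_URL' in env_dict:
--         return 'cache'
--     elif 'QUEUE_URL' in env_dict or 'QUEUE_TOPIC' in env_dict:
--         return 'queue'
--     elif any(k in env_dict for k in ['S3_ENDPOINT', 'S3_BUCKET', 'AZURE_STORAGE_CONNECTION_STRING', 'GCS_BUCKET']):
--         return 'bucket'
--     elif 'LLM_ENDPOINT' in env_dict or 'LLM_MODEL' in env_dict: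
--         return 'llm'
--     elif 'SEARCH_URL' in env_dict:
--         return 'search'
--     elif 'FUNCTION_ARN' in env_dict or 'FUNCTION_URL' in env_dict:
--         return 'function'
--     else:
--         return 'unknown'
-- ===== SOURCE B (Python) =====
-- _KEY_INFO = {
--     'DATABASE_URL': (0, 'database'),
--     'REDIS_URL': (1, 'cache'),
--     'QUEUE_URL': (2, 'queue'),
--     'QUEUE_TOPIC': (2, 'queue'),
--     'S3_ENDPOINT': (3, 'bucket'),
--     'S3_BUCKET': (3, 'bucket'),
--     'AZURE_STORAGE_CONNECTION_STRING': (3, 'bucket'),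
--     'GCS_BUCKET': (3, 'bucket'),
--     'LLM_ENDPOINT': (4, 'llm'),
--     'LLM_MODEL': (4, 'llm'),
--     'SEARCH_URL': (5, 'search'),
--     'FUNCTION_ARN': (6, 'function'),
--     'FUNCTION_URL': (6, 'function'),
-- }
--
-- def _infer_resource_type(env_dict):
--     'Infer resource type from environment variables'
--     best_rank, best_type = 7, 'unknown'
--     for k in env_dict:
--         rank, rtype = _KEY_INFO.get(k, (7, 'unknown'))
--         if rank < best_rank:
--             best_rank, best_type = rank, rtype
--     return best_type
-- ===== Notes on version B (the rewrite author's own statement) =====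
-- stated objective: alternative
-- what changed: Instead of testing each known env key against the dict in a fixed cascade, B scans the given env keys once, looks each up in a key->(priority,type) map, and keeps the minimum-priority match.
import Mathlib
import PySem

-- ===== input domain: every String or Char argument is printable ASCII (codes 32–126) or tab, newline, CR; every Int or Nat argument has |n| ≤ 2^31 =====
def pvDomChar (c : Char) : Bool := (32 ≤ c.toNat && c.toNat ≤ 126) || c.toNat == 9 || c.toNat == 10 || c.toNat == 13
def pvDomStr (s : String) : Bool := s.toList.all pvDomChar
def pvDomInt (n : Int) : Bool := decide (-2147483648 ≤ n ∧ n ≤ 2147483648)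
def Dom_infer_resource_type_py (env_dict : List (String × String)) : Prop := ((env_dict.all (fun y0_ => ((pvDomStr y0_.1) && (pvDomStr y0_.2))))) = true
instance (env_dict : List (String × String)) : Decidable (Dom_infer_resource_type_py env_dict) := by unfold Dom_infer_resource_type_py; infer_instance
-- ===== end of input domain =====

-- B inverts A's traversal: instead of testing each known key against the dict in a fixed cascade,
-- B scans the env keys once and keeps the minimum-priority match from a key->(priority,type) table.


-- ===== PORT A =====
-- 'k in env_dict' on a Python dict = key membership in the association list
def pvHasKey (env_dict : List (String × String)) (k : String) : Bool :=
  env_dict.any (fun p => p.1 == k)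

def infer_resource_type_py (env_dict : List (String × String)) : String :=
  if pvHasKey env_dict "DATABASE_URL" then "database"
  else if pvHasKey env_dict "REDIS_URL" then "cache"
  else if pvHasKey env_dict "QUEUE_URL" || pvHasKey env_dict "QUEUE_TOPIC" then "queue"
  else if (["S3_ENDPOINT", "S3_BUCKET", "AZURE_STORAGE_CONNECTION_STRING", "GCS_BUCKET"].any
      (fun k => pvHasKey env_dict k)) then "bucket"
  else if pvHasKey env_dict "LLM_ENDPOINT" || pvHasKey env_dict "LLM_MODEL" then "llm"
  else if pvHasKey env_dict "SEARCH_URL" then "search"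
  else if pvHasKey env_dict "FUNCTION_ARN" || pvHasKey env_dict "FUNCTION_URL" then "function"
  else "unknown"

-- ===== PORT B =====
-- B: module-level key -> (priority, type) table (_KEY_INFO in Source B), a Python dict as an association list
def pvKeyInfo : List (String × (Int × String)) :=
  [("DATABASE_URL", (0, "database")),
   ("REDIS_URL", (1, "cache")),
   ("QUEUE_URL", (2, "queue")),
   ("QUEUE_TOPIC", (2, "queue")),
   ("S3_ENDPOINT", (3, "bucket")),
   ("S3_BUCKET", (3, "bucket")),
   ("AZURE_STORAGE_CONNECTION_STRING", (3, "bucket")),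
   ("GCS_BUCKET", (3, "bucket")),
   ("LLM_ENDPOINT", (4, "llm")),
   ("LLM_MODEL", (4, "llm")),
   ("SEARCH_URL", (5, "search")),
   ("FUNCTION_ARN", (6, "function")),
   ("FUNCTION_URL", (6, "function"))]

-- dict lookup (first match; keys above are distinct)
def pvGet : List (String × (Int × String)) → String → Option (Int × String)
  | [], _ => none
  | p :: rest, k => if p.1 == k then some p.2 else pvGet rest k

-- the loop 'for k in env_dict: rank, rtype = _KEY_INFO.get(k, (7, "unknown")); if rank < best_rank: ...'
def infer_resource_type_py_alt (env_dict : List (String × String)) : String :=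
  (env_dict.foldl
    (fun best p =>
      let ri := (pvGet pvKeyInfo p.1).getD (7, "unknown")
      if ri.1 < best.1 then ri else best)
    ((7 : Int), "unknown")).2

-- ===== PRECONDITION & SPEC =====
def Spec_infer_resource_type_py (env_dict : List (String × String)) (out : String) : Prop := out = infer_resource_type_py_alt env_dict
instance (env_dict : List (String × String)) (out : String) : Decidable (Spec_infer_resource_type_py env_dict out) := by unfold Spec_infer_resource_type_py; infer_instance

-- ===== CLAIM =====
def Claim_equal_infer_resource_type_py : Prop := ∀ (env_dict : List (String × String)), Dom_infer_resource_type_py env_dict → Spec_infer_resource_type_py env_dict (infer_resource_type_py env_dict)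

-- ===== LEMMAS AND PROOFS =====

-- rank of a key in B's table (7 = not a recognised key)
def pvRank (k : String) : Int := ((pvGet pvKeyInfo k).getD (7, "unknown")).1

-- the resource type named by each rank
def pvTypeOf (r : Int) : String :=
  if r = 0 then "database" else if r = 1 then "cache" else if r = 2 then "queue"
  else if r = 3 then "bucket" else if r = 4 then "llm" else if r = 5 then "search"
  else if r = 6 then "function" else "unknown"

-- minimum rank of the env keys
def pvMinR (env : List (String × String)) : Int :=
  env.foldl (fun m p => min m (pvRank p.1)) 7

lemma pvGet_mem (T : List (String × (Int × String))) (k : String) (v : Int × String)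
    (h : pvGet T k = some v) : (k, v) ∈ T := by
  induction T with
  | nil => simp [pvGet] at h
  | cons p rest ih =>
    rw [pvGet] at h
    by_cases hb : (p.1 == k) = true
    · rw [if_pos hb] at h
      obtain rfl : p.2 = v := by injection h
      exact List.mem_cons.2 (Or.inl (by rw [← (beq_iff_eq).1 hb]))
    · rw [if_neg hb] at h
      exact List.mem_cons.2 (Or.inr (ih h))

lemma pvInfo_eq (k : String) :
    (pvGet pvKeyInfo k).getD (7, "unknown") = (pvRank k, pvTypeOf (pvRank k)) := by
  unfold pvRank
  cases hg : pvGet pvKeyInfo k with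
  | none => rfl
  | some v =>
    have hm := pvGet_mem _ _ _ hg
    have hv : v.2 = pvTypeOf v.1 := by
      simp only [pvKeyInfo, List.mem_cons, List.not_mem_nil, or_false, Prod.mk.injEq] at hm
      rcases hm with ⟨_, rfl⟩|⟨_, rfl⟩|⟨_, rfl⟩|⟨_, rfl⟩|⟨_, rfl⟩|⟨_, rfl⟩|⟨_, rfl⟩|⟨_, rfl⟩|⟨_, rfl⟩|⟨_, rfl⟩|⟨_, rfl⟩|⟨_, rfl⟩|⟨_, rfl⟩ <;> rfl
    simp only [Option.getD_some]
    exact Prod.ext rfl hv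

lemma pvRank_nonneg (k : String) : 0 ≤ pvRank k := by
  unfold pvRank
  cases hg : pvGet pvKeyInfo k with
  | none => norm_num
  | some v =>
    have hm := pvGet_mem _ _ _ hg
    simp only [pvKeyInfo, List.mem_cons, List.not_mem_nil, or_false, Prod.mk.injEq] at hm
    rcases hm with ⟨_, rfl⟩|⟨_, rfl⟩|⟨_, rfl⟩|⟨_, rfl⟩|⟨_, rfl⟩|⟨_, rfl⟩|⟨_, rfl⟩|⟨_, rfl⟩|⟨_, rfl⟩|⟨_, rfl⟩|⟨_, rfl⟩|⟨_, rfl⟩|⟨_, rfl⟩ <;> norm_num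

-- which keys carry a given rank
lemma pvRank_keys (k : String) (i : Int) (hi : i ≠ 7) (h : pvRank k = i) :
    (i = 0 ∧ k = "DATABASE_URL") ∨ (i = 1 ∧ k = "REDIS_URL")
    ∨ (i = 2 ∧ (k = "QUEUE_URL" ∨ k = "QUEUE_TOPIC"))
    ∨ (i = 3 ∧ (k = "S3_ENDPOINT" ∨ k = "S3_BUCKET" ∨ k = "AZURE_STORAGE_CONNECTION_STRING" ∨ k = "GCS_BUCKET"))
    ∨ (i = 4 ∧ (k = "LLM_ENDPOINT" ∨ k = "LLM_MODEL"))
    ∨ (i = 5 ∧ k = "SEARCH_URL")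
    ∨ (i = 6 ∧ (k = "FUNCTION_ARN" ∨ k = "FUNCTION_URL")) := by
  unfold pvRank at h
  cases hg : pvGet pvKeyInfo k with
  | none => rw [hg] at h; exact absurd h.symm hi
  | some v =>
    rw [hg] at h
    simp only [Option.getD_some] at h
    have hm := pvGet_mem _ _ _ hg
    simp only [pvKeyInfo, List.mem_cons, List.not_mem_nil, or_false, Prod.mk.injEq] at hm
    rcases hm with ⟨rfl, rfl⟩|⟨rfl, rfl⟩|⟨rfl, rfl⟩|⟨rfl, rfl⟩|⟨rfl, rfl⟩|⟨rfl, rfl⟩|⟨rfl, rfl⟩|⟨rfl, rfl⟩|⟨rfl, rfl⟩|⟨rfl, rfl⟩|⟨rfl, rfl⟩|⟨rfl, rfl⟩|⟨rfl, rfl⟩ <;>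
      norm_num at h <;> subst h
    · exact Or.inl ⟨rfl, rfl⟩
    · exact Or.inr (Or.inl ⟨rfl, rfl⟩)
    · exact Or.inr (Or.inr (Or.inl ⟨rfl, Or.inl rfl⟩))
    · exact Or.inr (Or.inr (Or.inl ⟨rfl, Or.inr rfl⟩))
    · exact Or.inr (Or.inr (Or.inr (Or.inl ⟨rfl, Or.inl rfl⟩)))
    · exact Or.inr (Or.inr (Or.inr (Or.inl ⟨rfl, Or.inr (Or.inl rfl)⟩)))
    · exact Or.inr (Or.inr (Or.inr (Or.inl ⟨rfl, Or.inr (Or.inr (Or.inl rfl))⟩)))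
    · exact Or.inr (Or.inr (Or.inr (Or.inl ⟨rfl, Or.inr (Or.inr (Or.inr rfl))⟩)))
    · exact Or.inr (Or.inr (Or.inr (Or.inr (Or.inl ⟨rfl, Or.inl rfl⟩))))
    · exact Or.inr (Or.inr (Or.inr (Or.inr (Or.inl ⟨rfl, Or.inr rfl⟩))))
    · exact Or.inr (Or.inr (Or.inr (Or.inr (Or.inr (Or.inl ⟨rfl, rfl⟩)))))
    · exact Or.inr (Or.inr (Or.inr (Or.inr (Or.inr (Or.inr ⟨rfl, Or.inl rfl⟩)))))
    · exact Or.inr (Or.inr (Or.inr (Or.inr (Or.inr (Or.inr ⟨rfl, Or.inr rfl⟩)))))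

-- rank of each table key, by evaluation
lemma pvRankDB : pvRank "DATABASE_URL" = 0 := by decide
lemma pvRankRD : pvRank "REDIS_URL" = 1 := by decide
lemma pvRankQU : pvRank "QUEUE_URL" = 2 := by decide
lemma pvRankQT : pvRank "QUEUE_TOPIC" = 2 := by decide
lemma pvRankS1 : pvRank "S3_ENDPOINT" = 3 := by decide
lemma pvRankS2 : pvRank "S3_BUCKET" = 3 := by decide
lemma pvRankS3 : pvRank "AZURE_STORAGE_CONNECTION_STRING" = 3 := by decide
lemma pvRankS4 : pvRank "GCS_BUCKET" = 3 := by decide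
lemma pvRankL1 : pvRank "LLM_ENDPOINT" = 4 := by decide
lemma pvRankL2 : pvRank "LLM_MODEL" = 4 := by decide
lemma pvRankSE : pvRank "SEARCH_URL" = 5 := by decide
lemma pvRankF1 : pvRank "FUNCTION_ARN" = 6 := by decide
lemma pvRankF2 : pvRank "FUNCTION_URL" = 6 := by decide

lemma pvFold_eq (l : List (String × String)) : ∀ b : Int,
    l.foldl (fun best p =>
        let ri := (pvGet pvKeyInfo p.1).getD (7, "unknown")
        if ri.1 < best.1 then ri else best) (b, pvTypeOf b)
      = (l.foldl (fun m p => min m (pvRank p.1)) b,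
         pvTypeOf (l.foldl (fun m p => min m (pvRank p.1)) b)) := by
  induction l with
  | nil => intro b; rfl
  | cons p l ih =>
    intro b
    rw [List.foldl_cons, List.foldl_cons]
    have h1 : (let ri := (pvGet pvKeyInfo p.1).getD (7, "unknown")
        if ri.1 < (b, pvTypeOf b).1 then ri else (b, pvTypeOf b))
        = (min b (pvRank p.1), pvTypeOf (min b (pvRank p.1))) := by
      simp only [pvInfo_eq]
      by_cases h : pvRank p.1 < b
      · rw [if_pos h, show min b (pvRank p.1) = pvRank p.1 from by omega]
      · rw [if_neg h, show min b (pvRank p.1) = b from by omega]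
    rw [h1]
    exact ih (min b (pvRank p.1))

lemma pvAlt_eq (env : List (String × String)) :
    infer_resource_type_py_alt env = pvTypeOf (pvMinR env) := by
  unfold infer_resource_type_py_alt pvMinR
  have h := pvFold_eq env 7
  rw [show pvTypeOf 7 = "unknown" from rfl] at h
  rw [h]

lemma pvMinR_le_iff (env : List (String × String)) (i : Int) :
    pvMinR env ≤ i ↔ (7 ≤ i ∨ ∃ p ∈ env, pvRank p.1 ≤ i) := by
  unfold pvMinR
  have gen : ∀ (l : List (String × String)) (b : Int),
      l.foldl (fun m p => min m (pvRank p.1)) b ≤ i ↔ (b ≤ i ∨ ∃ p ∈ l, pvRank p.1 ≤ i) := by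
    intro l
    induction l with
    | nil => intro b; simp
    | cons p l ih =>
      intro b
      simp only [List.foldl_cons, ih, List.mem_cons]
      constructor
      · rintro (h | ⟨q, hq, h⟩)
        · rcases le_total b (pvRank p.1) with h' | h'
          · exact Or.inl (by omega)
          · exact Or.inr ⟨p, Or.inl rfl, by omega⟩
        · exact Or.inr ⟨q, Or.inr hq, h⟩
      · rintro (h | ⟨q, hq, h⟩)
        · exact Or.inl (by omega)
        · rcases hq with rfl | hq
          · exact Or.inl (by omega)
          · exact Or.inr ⟨q, hq, h⟩
  exact gen env 7

lemma pvHasKey_iff (env : List (String × String)) (k : String) :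
    pvHasKey env k = true ↔ ∃ p ∈ env, p.1 = k := by
  simp [pvHasKey]

lemma pvMain (env : List (String × String)) :
    infer_resource_type_py env = pvTypeOf (pvMinR env) := by
  have key := pvMinR_le_iff env
  have hm7 : pvMinR env ≤ 7 := (key 7).2 (Or.inl le_rfl)
  have hm0 : 0 ≤ pvMinR env := by
    by_contra h
    rcases (key (-1)).1 (by omega) with h7 | ⟨p, _, hp⟩
    · omega
    · have := pvRank_nonneg p.1; omega
  have noLow : ∀ i : Int, ¬ pvMinR env ≤ i → ∀ p ∈ env, ¬ pvRank p.1 ≤ i := by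
    intro i hi p hp hr
    exact hi ((key i).2 (Or.inr ⟨p, hp, hr⟩))
  have exAt : ∀ i : Int, pvMinR env = i → i < 7 → ∃ p ∈ env, pvRank p.1 = i := by
    intro i hi hlt
    rcases (key i).1 (le_of_eq hi) with h7 | ⟨p, hp, hle⟩
    · omega
    · have := noLow (i - 1) (by omega) p hp
      exact ⟨p, hp, by omega⟩
  have noKey : ∀ i : Int, pvMinR env > i → ∀ p ∈ env, pvRank p.1 ≠ i := by
    intro i hi p hp h
    exact noLow i (by omega) p hp (le_of_eq h)
  have hkF : ∀ (k : String) (i : Int), (∀ p ∈ env, pvRank p.1 ≠ i) →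
      pvRank k = i → pvHasKey env k = false := by
    intro k i hno hk
    rw [← Bool.not_eq_true, pvHasKey_iff]
    rintro ⟨p, hp, hpe⟩
    exact hno p hp (by rw [hpe]; exact hk)
  have hcases : pvMinR env = 0 ∨ pvMinR env = 1 ∨ pvMinR env = 2 ∨ pvMinR env = 3 ∨
      pvMinR env = 4 ∨ pvMinR env = 5 ∨ pvMinR env = 6 ∨ pvMinR env = 7 := by omega
  rcases hcases with h|h|h|h|h|h|h|h <;> rw [h]
  · obtain ⟨p, hp, hr⟩ := exAt 0 h (by norm_num)
    have hk := pvRank_keys p.1 0 (by norm_num) hr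
    have hp1 : p.1 = "DATABASE_URL" := by
      rcases hk with ⟨_, h⟩|⟨h, _⟩|⟨h, _⟩|⟨h, _⟩|⟨h, _⟩|⟨h, _⟩|⟨h, _⟩ <;> first | exact h | omega
    have g0 : pvHasKey env "DATABASE_URL" = true := (pvHasKey_iff env _).2 ⟨p, hp, hp1⟩
    simp [infer_resource_type_py, g0, pvTypeOf]
  · obtain ⟨p, hp, hr⟩ := exAt 1 h (by norm_num)
    have hk := pvRank_keys p.1 1 (by norm_num) hr
    have hp1 : p.1 = "REDIS_URL" := by
      rcases hk with ⟨h, _⟩|⟨_, h⟩|⟨h, _⟩|⟨h, _⟩|⟨h, _⟩|⟨h, _⟩|⟨h, _⟩ <;> first | exact h | omega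
    have g0 : pvHasKey env "DATABASE_URL" = false := hkF _ 0 (noKey 0 (by omega)) pvRankDB
    have g1 : pvHasKey env "REDIS_URL" = true := (pvHasKey_iff env _).2 ⟨p, hp, hp1⟩
    simp [infer_resource_type_py, g0, g1, pvTypeOf]
  · obtain ⟨p, hp, hr⟩ := exAt 2 h (by norm_num)
    have hk := pvRank_keys p.1 2 (by norm_num) hr
    have hp1 : p.1 = "QUEUE_URL" ∨ p.1 = "QUEUE_TOPIC" := by
      rcases hk with ⟨h, _⟩|⟨h, _⟩|⟨_, h⟩|⟨h, _⟩|⟨h, _⟩|⟨h, _⟩|⟨h, _⟩ <;> first | exact h | omega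
    have g0 : pvHasKey env "DATABASE_URL" = false := hkF _ 0 (noKey 0 (by omega)) pvRankDB
    have g1 : pvHasKey env "REDIS_URL" = false := hkF _ 1 (noKey 1 (by omega)) pvRankRD
    have g2 : (pvHasKey env "QUEUE_URL" || pvHasKey env "QUEUE_TOPIC") = true := by
      rcases hp1 with h | h
      · simp [(pvHasKey_iff env _).2 ⟨p, hp, h⟩]
      · simp [(pvHasKey_iff env _).2 ⟨p, hp, h⟩]
    simp [infer_resource_type_py, g0, g1, g2, pvTypeOf]
  · obtain ⟨p, hp, hr⟩ := exAt 3 h (by norm_num)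
    have hk := pvRank_keys p.1 3 (by norm_num) hr
    have hp1 : p.1 = "S3_ENDPOINT" ∨ p.1 = "S3_BUCKET" ∨ p.1 = "AZURE_STORAGE_CONNECTION_STRING" ∨ p.1 = "GCS_BUCKET" := by
      rcases hk with ⟨h, _⟩|⟨h, _⟩|⟨h, _⟩|⟨_, h⟩|⟨h, _⟩|⟨h, _⟩|⟨h, _⟩ <;> first | exact h | omega
    have g0 : pvHasKey env "DATABASE_URL" = false := hkF _ 0 (noKey 0 (by omega)) pvRankDB
    have g1 : pvHasKey env "REDIS_URL" = false := hkF _ 1 (noKey 1 (by omega)) pvRankRD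
    have n2 := noKey 2 (by omega)
    have gq : pvHasKey env "QUEUE_URL" = false := hkF _ 2 n2 pvRankQU
    have gt : pvHasKey env "QUEUE_TOPIC" = false := hkF _ 2 n2 pvRankQT
    have g3 : (["S3_ENDPOINT", "S3_BUCKET", "AZURE_STORAGE_CONNECTION_STRING", "GCS_BUCKET"].any
        (fun k => pvHasKey env k)) = true := by
      simp only [List.any_cons, List.any_nil, Bool.or_eq_true]
      rcases hp1 with h | h | h | h
      · exact Or.inl ((pvHasKey_iff env _).2 ⟨p, hp, h⟩)
      · exact Or.inr (Or.inl ((pvHasKey_iff env _).2 ⟨p, hp, h⟩))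
      · exact Or.inr (Or.inr (Or.inl ((pvHasKey_iff env _).2 ⟨p, hp, h⟩)))
      · exact Or.inr (Or.inr (Or.inr (Or.inl ((pvHasKey_iff env _).2 ⟨p, hp, h⟩))))
    simp [infer_resource_type_py, g0, g1, gq, gt, g3, pvTypeOf]
  · obtain ⟨p, hp, hr⟩ := exAt 4 h (by norm_num)
    have hk := pvRank_keys p.1 4 (by norm_num) hr
    have hp1 : p.1 = "LLM_ENDPOINT" ∨ p.1 = "LLM_MODEL" := by
      rcases hk with ⟨h, _⟩|⟨h, _⟩|⟨h, _⟩|⟨h, _⟩|⟨_, h⟩|⟨h, _⟩|⟨h, _⟩ <;> first | exact h | omega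
    have g0 : pvHasKey env "DATABASE_URL" = false := hkF _ 0 (noKey 0 (by omega)) pvRankDB
    have g1 : pvHasKey env "REDIS_URL" = false := hkF _ 1 (noKey 1 (by omega)) pvRankRD
    have n2 := noKey 2 (by omega); have n3 := noKey 3 (by omega)
    have gq : pvHasKey env "QUEUE_URL" = false := hkF _ 2 n2 pvRankQU
    have gt : pvHasKey env "QUEUE_TOPIC" = false := hkF _ 2 n2 pvRankQT
    have gs1 : pvHasKey env "S3_ENDPOINT" = false := hkF _ 3 n3 pvRankS1
    have gs2 : pvHasKey env "S3_BUCKET" = false := hkF _ 3 n3 pvRankS2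
    have gs3 : pvHasKey env "AZURE_STORAGE_CONNECTION_STRING" = false := hkF _ 3 n3 pvRankS3
    have gs4 : pvHasKey env "GCS_BUCKET" = false := hkF _ 3 n3 pvRankS4
    have g4 : (pvHasKey env "LLM_ENDPOINT" || pvHasKey env "LLM_MODEL") = true := by
      rcases hp1 with h | h
      · simp [(pvHasKey_iff env _).2 ⟨p, hp, h⟩]
      · simp [(pvHasKey_iff env _).2 ⟨p, hp, h⟩]
    simp [infer_resource_type_py, g0, g1, gq, gt, gs1, gs2, gs3, gs4, g4, pvTypeOf]
  · obtain ⟨p, hp, hr⟩ := exAt 5 h (by norm_num)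
    have hk := pvRank_keys p.1 5 (by norm_num) hr
    have hp1 : p.1 = "SEARCH_URL" := by
      rcases hk with ⟨h, _⟩|⟨h, _⟩|⟨h, _⟩|⟨h, _⟩|⟨h, _⟩|⟨_, h⟩|⟨h, _⟩ <;> first | exact h | omega
    have g0 : pvHasKey env "DATABASE_URL" = false := hkF _ 0 (noKey 0 (by omega)) pvRankDB
    have g1 : pvHasKey env "REDIS_URL" = false := hkF _ 1 (noKey 1 (by omega)) pvRankRD
    have n2 := noKey 2 (by omega); have n3 := noKey 3 (by omega); have n4 := noKey 4 (by omega)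
    have gq : pvHasKey env "QUEUE_URL" = false := hkF _ 2 n2 pvRankQU
    have gt : pvHasKey env "QUEUE_TOPIC" = false := hkF _ 2 n2 pvRankQT
    have gs1 : pvHasKey env "S3_ENDPOINT" = false := hkF _ 3 n3 pvRankS1
    have gs2 : pvHasKey env "S3_BUCKET" = false := hkF _ 3 n3 pvRankS2
    have gs3 : pvHasKey env "AZURE_STORAGE_CONNECTION_STRING" = false := hkF _ 3 n3 pvRankS3
    have gs4 : pvHasKey env "GCS_BUCKET" = false := hkF _ 3 n3 pvRankS4
    have gl1 : pvHasKey env "LLM_ENDPOINT" = false := hkF _ 4 n4 pvRankL1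
    have gl2 : pvHasKey env "LLM_MODEL" = false := hkF _ 4 n4 pvRankL2
    have g5 : pvHasKey env "SEARCH_URL" = true := (pvHasKey_iff env _).2 ⟨p, hp, hp1⟩
    simp [infer_resource_type_py, g0, g1, gq, gt, gs1, gs2, gs3, gs4, gl1, gl2, g5, pvTypeOf]
  · obtain ⟨p, hp, hr⟩ := exAt 6 h (by norm_num)
    have hk := pvRank_keys p.1 6 (by norm_num) hr
    have hp1 : p.1 = "FUNCTION_ARN" ∨ p.1 = "FUNCTION_URL" := by
      rcases hk with ⟨h, _⟩|⟨h, _⟩|⟨h, _⟩|⟨h, _⟩|⟨h, _⟩|⟨h, _⟩|⟨_, h⟩ <;> first | exact h | omega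
    have g0 : pvHasKey env "DATABASE_URL" = false := hkF _ 0 (noKey 0 (by omega)) pvRankDB
    have g1 : pvHasKey env "REDIS_URL" = false := hkF _ 1 (noKey 1 (by omega)) pvRankRD
    have n2 := noKey 2 (by omega); have n3 := noKey 3 (by omega); have n4 := noKey 4 (by omega)
    have gq : pvHasKey env "QUEUE_URL" = false := hkF _ 2 n2 pvRankQU
    have gt : pvHasKey env "QUEUE_TOPIC" = false := hkF _ 2 n2 pvRankQT
    have gs1 : pvHasKey env "S3_ENDPOINT" = false := hkF _ 3 n3 pvRankS1
    have gs2 : pvHasKey env "S3_BUCKET" = false := hkF _ 3 n3 pvRankS2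
    have gs3 : pvHasKey env "AZURE_STORAGE_CONNECTION_STRING" = false := hkF _ 3 n3 pvRankS3
    have gs4 : pvHasKey env "GCS_BUCKET" = false := hkF _ 3 n3 pvRankS4
    have gl1 : pvHasKey env "LLM_ENDPOINT" = false := hkF _ 4 n4 pvRankL1
    have gl2 : pvHasKey env "LLM_MODEL" = false := hkF _ 4 n4 pvRankL2
    have g5 : pvHasKey env "SEARCH_URL" = false := hkF _ 5 (noKey 5 (by omega)) pvRankSE
    have g6 : (pvHasKey env "FUNCTION_ARN" || pvHasKey env "FUNCTION_URL") = true := by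
      rcases hp1 with h | h
      · simp [(pvHasKey_iff env _).2 ⟨p, hp, h⟩]
      · simp [(pvHasKey_iff env _).2 ⟨p, hp, h⟩]
    simp [infer_resource_type_py, g0, g1, gq, gt, gs1, gs2, gs3, gs4, gl1, gl2, g5, g6, pvTypeOf]
  · -- m = 7: no recognised key at all
    have noAll : ∀ i : Int, i ≤ 6 → ∀ p ∈ env, pvRank p.1 ≠ i := by
      intro i hi p hp h
      exact absurd ((pvMinR_le_iff env i).2 (Or.inr ⟨p, hp, le_of_eq h⟩)) (by omega)
    have g0 : pvHasKey env "DATABASE_URL" = false := hkF _ 0 (noAll 0 (by norm_num)) pvRankDB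
    have g1 : pvHasKey env "REDIS_URL" = false := hkF _ 1 (noAll 1 (by norm_num)) pvRankRD
    have gq : pvHasKey env "QUEUE_URL" = false := hkF _ 2 (noAll 2 (by norm_num)) pvRankQU
    have gt : pvHasKey env "QUEUE_TOPIC" = false := hkF _ 2 (noAll 2 (by norm_num)) pvRankQT
    have gs1 : pvHasKey env "S3_ENDPOINT" = false := hkF _ 3 (noAll 3 (by norm_num)) pvRankS1
    have gs2 : pvHasKey env "S3_BUCKET" = false := hkF _ 3 (noAll 3 (by norm_num)) pvRankS2
    have gs3 : pvHasKey env "AZURE_STORAGE_CONNECTION_STRING" = false := hkF _ 3 (noAll 3 (by norm_num)) pvRankS3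
    have gs4 : pvHasKey env "GCS_BUCKET" = false := hkF _ 3 (noAll 3 (by norm_num)) pvRankS4
    have gl1 : pvHasKey env "LLM_ENDPOINT" = false := hkF _ 4 (noAll 4 (by norm_num)) pvRankL1
    have gl2 : pvHasKey env "LLM_MODEL" = false := hkF _ 4 (noAll 4 (by norm_num)) pvRankL2
    have g5 : pvHasKey env "SEARCH_URL" = false := hkF _ 5 (noAll 5 (by norm_num)) pvRankSE
    have gf1 : pvHasKey env "FUNCTION_ARN" = false := hkF _ 6 (noAll 6 (by norm_num)) pvRankF1
    have gf2 : pvHasKey env "FUNCTION_URL" = false := hkF _ 6 (noAll 6 (by norm_num)) pvRankF2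
    simp [infer_resource_type_py, g0, g1, gq, gt, gs1, gs2, gs3, gs4, gl1, gl2, g5, gf1, gf2, pvTypeOf]

-- ===== VERDICT =====
theorem infer_resource_type_py_spec : Claim_equal_infer_resource_type_py := by
  intro env _
  unfold Spec_infer_resource_type_py
  rw [pvAlt_eq, pvMain]
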